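-- pv_equiv track=rewrite | github.com/L0rd5ud0/Python | ezra_code/day_4/problem2.py | word_index
-- ===== SOURCE A (Python) =====
-- def word_index(list):
--     longest_word = ""
--     for word in list:
--         if len(word) > len(longest_word):
--             longest_word = word
--     if longest_word in list:
--         return list.index(longest_word)
--     else:
--         return 0
-- ===== SOURCE B (Python) =====
-- def word_index(list):
--     best_index = 0
--     best_len = -1
--     for i, word in enumerate(list):
--         if len(word) > best_len:
--             best_index = i
--             best_len = len(word)
--     return best_index
-- ===== Notes on version B (the rewrite author's own statement) =====
-- stated objective: simpler
-- what changed: B tracks the best index and length inline in a single enumerate pass, eliminating A's second scan (membership test plus list.index) and the special 0 fallback.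
import Mathlib
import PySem

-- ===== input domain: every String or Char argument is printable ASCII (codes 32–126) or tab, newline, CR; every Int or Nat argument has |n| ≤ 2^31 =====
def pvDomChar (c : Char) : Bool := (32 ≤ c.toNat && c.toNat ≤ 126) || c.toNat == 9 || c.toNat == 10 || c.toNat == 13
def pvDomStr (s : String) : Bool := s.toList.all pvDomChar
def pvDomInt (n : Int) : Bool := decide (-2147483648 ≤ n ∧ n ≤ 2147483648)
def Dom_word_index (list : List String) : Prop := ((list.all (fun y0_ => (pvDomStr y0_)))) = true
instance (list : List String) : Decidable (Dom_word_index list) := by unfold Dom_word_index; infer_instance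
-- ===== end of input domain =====

-- B replaces A's find-the-longest-word-then-rescan (membership test + list.index) by a single
-- enumerate pass that maintains the best index and best length inline (objective: simpler).

-- ===== PORT A =====
-- the loop accumulating the longest word (first one on ties, seeded with "")
def aLongest (list : List String) : String :=
  list.foldl (fun acc w => if w.length > acc.length then w else acc) ""

def word_index (list : List String) : Int :=
  let longest_word := aLongest list
  if longest_word ∈ list then
    ((PySem.List.index? list longest_word).getD 0 : Nat)  -- guarded by the membership test, so never none
  else
    0

-- ===== PORT B =====
-- the loop body: state is (best_index, best_len)
def bStep (st : Int × Int) (p : Int × String) : Int × Int :=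
  if (p.2.length : Int) > st.2 then (p.1, (p.2.length : Int)) else st

def bFold (list : List String) : Int × Int :=
  (PySem.List.enumerate list 0).foldl bStep (0, -1)

def word_index_alt (list : List String) : Int :=
  (bFold list).1

-- ===== PRECONDITION & SPEC =====
def Spec_word_index (list : List String) (out : Int) : Prop := out = word_index_alt list
instance (list : List String) (out : Int) : Decidable (Spec_word_index list out) := by unfold Spec_word_index; infer_instance

-- ===== CLAIM (what is proved, stated in full; the proofs are below) =====
def Claim_equal_word_index : Prop := ∀ (list : List String), Dom_word_index list → Spec_word_index list (word_index list)

-- ===== LEMMAS AND PROOFS =====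

-- joint invariant of the two loops over a nonempty list: B's state is (k, L.length) where
-- L = aLongest l, k is an index with l[k] = L, everything before k is strictly shorter,
-- and L.length is the maximum length in l.
theorem main_inv (l : List String) (hl : l ≠ []) :
    ∃ (k : Nat) (hk : k < l.length),
      bFold l = ((k : Int), ((aLongest l).length : Int)) ∧
      l[k] = aLongest l ∧
      (∀ j (hj : j < l.length), l[j].length ≤ (aLongest l).length) ∧
      (∀ j (hj : j < k), l[j]'(by omega) ≠ aLongest l ∧ (l[j]'(by omega)).length < (aLongest l).length) := by
  induction l using List.reverseRecOn with
  | nil => exact absurd rfl hl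
  | append_singleton l w ih =>
    have hA : aLongest (l ++ [w]) =
        if w.length > (aLongest l).length then w else aLongest l := by
      simp [aLongest, List.foldl_append]
    have hB : bFold (l ++ [w]) = bStep (bFold l) ((l.length : Int), w) := by
      simp [bFold, PySem.List.enumerate_append, PySem.List.enumerate_cons,
        PySem.List.enumerate_nil, List.foldl_append]
    by_cases hnil : l = []
    · subst hnil
      simp only [List.nil_append] at hA hB ⊢
      have hA0 : aLongest [w] = if 0 < w.length then w else "" := by
        simp [aLongest]
      have hlen : (aLongest [w]).length = w.length := by
        rw [hA0]; split_ifs with h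
        · rfl
        · simp; omega
      refine ⟨0, by simp, ?_, ?_, ?_, ?_⟩
      · rw [hB, hlen]
        have hb0 : bFold ([] : List String) = (0, -1) := by
          simp [bFold, PySem.List.enumerate_nil]
        rw [hb0]
        simp only [bStep]
        split_ifs with h1
        · simp
        · exfalso; push_cast at h1; omega
      · show w = aLongest [w]
        rw [hA0]; split_ifs with h
        · rfl
        · have hw0 : w.toList = [] := List.length_eq_zero_iff.mp (by simpa using Nat.eq_zero_of_not_pos h)
          exact String.ext (by simpa using hw0)
      · intro j hj
        have hj0 : j = 0 := by simp at hj; omega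
        subst hj0
        simpa using Nat.le_of_eq hlen.symm
      · intro j hj
        omega
    · obtain ⟨k, hk, hb, hget, hmax, hlt⟩ := ih hnil
      by_cases hw : (aLongest l).length < w.length
      · refine ⟨l.length, by simp, ?_, ?_, ?_, ?_⟩
        · rw [hB, hb, hA]
          simp only [bStep]
          split_ifs with h1 <;> push_cast at h1 <;> first | rfl | (exfalso; omega)
        · rw [hA, if_pos (by omega)]
          exact List.getElem_concat_length rfl _
        · intro j hj
          rw [hA, if_pos (by omega)]
          rcases Nat.lt_or_ge j l.length with hj' | hj'
          · rw [List.getElem_append_left hj']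
            have := hmax j hj'
            omega
          · have hjl : j = l.length := by simp at hj; omega
            subst hjl
            rw [List.getElem_concat_length rfl _]
        · intro j hj
          rw [hA, if_pos (by omega)]
          have hjl : j < l.length := by omega
          rw [List.getElem_append_left hjl]
          have h1 := hmax j hjl
          refine ⟨fun hEq => ?_, by omega⟩
          rw [hEq] at h1
          omega
      · refine ⟨k, by simp; omega, ?_, ?_, ?_, ?_⟩
        · rw [hB, hb, hA]
          simp only [bStep]
          split_ifs with h1 <;> push_cast at h1 <;> first | rfl | (exfalso; omega)
        · rw [hA, if_neg (by omega), List.getElem_append_left hk]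
          exact hget
        · intro j hj
          rw [hA, if_neg (by omega)]
          rcases Nat.lt_or_ge j l.length with hj' | hj'
          · rw [List.getElem_append_left hj']
            exact hmax j hj'
          · have hjl : j = l.length := by simp at hj; omega
            subst hjl
            rw [List.getElem_concat_length rfl _]
            omega
        · intro j hj
          rw [hA, if_neg (by omega)]
          have hjl : j < l.length := by omega
          rw [List.getElem_append_left hjl]
          exact hlt j hj

-- ===== VERDICT (by name: the statement is the Claim_ definition above) =====
theorem word_index_spec : Claim_equal_word_index := by
  intro list _
  unfold Spec_word_index
  by_cases hnil : list = []
  · subst hnil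
    simp [word_index, word_index_alt, bFold, aLongest, PySem.List.enumerate_nil]
  · obtain ⟨k, hk, hb, hget, hmax, hlt⟩ := main_inv list hnil
    have hmem : aLongest list ∈ list := hget ▸ List.getElem_mem hk
    obtain ⟨m, hm⟩ := Option.isSome_iff_exists.mp
      ((PySem.List.index?_isSome_iff list (aLongest list)).mpr hmem)
    obtain ⟨hmlt, hmget, hmfirst⟩ := PySem.List.getElem_of_index?_eq_some hm
    have hmk : m = k := by
      rcases Nat.lt_trichotomy m k with h | h | h
      · exact absurd hmget (hlt m h).1
      · exact h
      · exact absurd hget (hmfirst k h)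
    subst hmk
    have hAval : word_index list = ((m : Nat) : Int) := by
      rw [word_index]
      simp only [hmem, if_pos]
      rw [hm]
      rfl
    have hBval : word_index_alt list = ((m : Nat) : Int) := by
      rw [word_index_alt, hb]
    rw [hAval, hBval]
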